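-- pv_equiv track=rewrite | github.com/timsteeno/AoC_2018 | day_2.py | get_total_exact_n
-- ===== SOURCE A (Python) =====
-- from collections import Counter
--
-- def get_total_exact_n(list_of_words, n):
--     """Given a list of words, get a 0/1 value for each word:
--            0 if there are no letters repeated exactly twice
--            1 if one or more letters are repeated exactly twice"""
--     store = []
--     for word in list_of_words:
--         dict_with_n = {k: v for (k, v) in Counter(word).items() if v == n}
--         if len(dict_with_n) > 0:
--             store.append(1)
--         else:
--             store.append(0)
--     return sum(store)
-- ===== SOURCE B (Python) =====
-- def get_total_exact_n(list_of_words, n):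
--     """Given a list of words, get a 0/1 value for each word:
--            0 if there are no letters repeated exactly twice
--            1 if one or more letters are repeated exactly twice"""
--     total = 0
--     for word in list_of_words:
--         chars = sorted(word)
--         i = 0
--         found = False
--         while i < len(chars):
--             j = i
--             while j < len(chars) and chars[j] == chars[i]:
--                 j += 1
--             if j - i == n:
--                 found = True
--                 break
--             i = j
--         if found:
--             total += 1
--     return total
-- ===== Notes on version B (the rewrite author's own statement) =====
-- stated objective: alternative
-- what changed: Per word, B sorts the characters and scans runs of equal letters with two indices (run length = letter frequency) instead of A's Counter hash-count plus dict-comprehension filter; B keeps a running total with early exit per word instead of building a 0/1 list and summing it.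
import Mathlib
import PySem

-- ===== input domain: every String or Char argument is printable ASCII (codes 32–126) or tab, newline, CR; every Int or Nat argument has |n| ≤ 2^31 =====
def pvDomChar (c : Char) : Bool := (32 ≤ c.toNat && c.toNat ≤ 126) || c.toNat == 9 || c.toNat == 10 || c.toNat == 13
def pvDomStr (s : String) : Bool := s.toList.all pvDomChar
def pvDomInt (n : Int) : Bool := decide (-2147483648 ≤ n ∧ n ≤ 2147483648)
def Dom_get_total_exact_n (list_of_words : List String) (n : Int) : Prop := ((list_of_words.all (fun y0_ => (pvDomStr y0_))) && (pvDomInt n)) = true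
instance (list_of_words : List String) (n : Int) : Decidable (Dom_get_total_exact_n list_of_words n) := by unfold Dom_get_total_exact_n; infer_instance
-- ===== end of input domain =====

-- B replaces A's per-word Counter + dict-comprehension filter by a sort-then-run-length scan
-- and a running total (objective: alternative algorithm, same behaviour).


-- ===== PORT A =====
-- store = []; for word: dict_with_n = {k: v for (k, v) in Counter(word).items() if v == n};
-- append 1 if len(dict_with_n) > 0 else 0; return sum(store)
def get_total_exact_n (list_of_words : List String) (n : Int) : Int :=
  (list_of_words.foldl (fun store word =>
    let dict_with_n : PySem.Dict Char Int :=
      (((PySem.Dict.counter word.toList).items).filter (fun kv => kv.2 == n)).foldl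
        (fun d kv => d.insert kv.1 kv.2) PySem.Dict.empty
    if dict_with_n.size > 0 then store ++ [(1 : Int)] else store ++ [(0 : Int)]) []).sum

-- ===== PORT B =====
-- the inner while loop of Source B: scan the sorted character list run by run;
-- a run's length is j - i in Source B; takeWhile/dropWhile compute the same run
def hasRunN (cs : List Char) (n : Int) : Bool :=
  match cs with
  | [] => false
  | c :: rest =>
    if (((c :: rest).takeWhile (· == c)).length : Int) == n then true
    else hasRunN ((c :: rest).dropWhile (· == c)) n
termination_by cs.length
decreasing_by
  simp only [List.dropWhile_cons, BEq.rfl, if_pos, List.length_cons]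
  exact Nat.lt_succ_of_le (List.length_dropWhile_le _ rest)

def get_total_exact_n_alt (list_of_words : List String) (n : Int) : Int :=
  list_of_words.foldl (fun total word =>
    if hasRunN (PySem.List.sorted word.toList (fun x => x) false) n then total + 1 else total) 0

-- ===== PRECONDITION & SPEC =====
def Spec_get_total_exact_n (list_of_words : List String) (n : Int) (out : Int) : Prop := out = get_total_exact_n_alt list_of_words n
instance (list_of_words : List String) (n : Int) (out : Int) : Decidable (Spec_get_total_exact_n list_of_words n out) := by unfold Spec_get_total_exact_n; infer_instance

-- ===== CLAIM (what is proved, stated in full; the proofs are below) =====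
def Claim_equal_get_total_exact_n : Prop := ∀ (list_of_words : List String) (n : Int), Dom_get_total_exact_n list_of_words n → Spec_get_total_exact_n list_of_words n (get_total_exact_n list_of_words n)

-- ===== LEMMAS AND PROOFS =====

-- in a sorted list every element is ≥ the head, so after dropping the head-run the head is gone
lemma head_not_mem_dropWhile (c : Char) (l : List Char)
    (hle : ∀ x ∈ l, c ≤ x) (hp : l.Pairwise (fun a b => a ≤ b)) :
    c ∉ l.dropWhile (· == c) := by
  induction l with
  | nil => simp
  | cons x t ih =>
    by_cases hx : x = c
    · subst hx
      simp only [List.dropWhile_cons, BEq.rfl, if_pos]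
      exact ih (fun y hy => hle y (List.mem_cons_of_mem _ hy)) (List.Pairwise.of_cons hp)
    · have hbeq : (x == c) = false := by simp [hx]
      simp only [List.dropWhile_cons, hbeq, if_neg, Bool.false_eq_true, not_false_iff]
      intro hmem
      rcases List.mem_cons.mp hmem with h | h
      · exact hx h.symm
      · have hxc : x ≤ c := (List.pairwise_cons.mp hp).1 c h
        have hcx : c ≤ x := hle x (List.mem_cons_self)
        exact hx (le_antisymm hxc hcx)

-- in a sorted list the count of the head equals the length of its leading run
lemma count_head_sorted (c : Char) (l : List Char)
    (hle : ∀ x ∈ l, c ≤ x) (hp : l.Pairwise (fun a b => a ≤ b)) :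
    l.count c = (l.takeWhile (· == c)).length := by
  conv_lhs => rw [← List.takeWhile_append_dropWhile (p := (· == c)) (l := l)]
  rw [List.count_append]
  have h1 : (l.takeWhile (· == c)).count c = (l.takeWhile (· == c)).length := by
    apply List.count_eq_length.mpr
    intro b hb
    have hb' := List.mem_takeWhile_imp (p := fun x => x == c) hb
    exact (eq_of_beq hb').symm
  have h2 : (l.dropWhile (· == c)).count c = 0 :=
    List.count_eq_zero.mpr (head_not_mem_dropWhile c l hle hp)
  omega

-- counts of non-head characters are unchanged by dropping the head-run
lemma count_other_dropWhile (c x : Char) (l : List Char) (hx : x ≠ c) :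
    l.count x = (l.dropWhile (· == c)).count x := by
  conv_lhs => rw [← List.takeWhile_append_dropWhile (p := (· == c)) (l := l)]
  rw [List.count_append]
  have h1 : (l.takeWhile (· == c)).count x = 0 := by
    apply List.count_eq_zero.mpr
    intro hmem
    exact hx (by simpa using List.mem_takeWhile_imp hmem)
  omega

-- the run scan on a sorted list finds exactly the characters whose frequency is n
lemma hasRunN_iff (n : Int) (cs : List Char) (hp : cs.Pairwise (fun a b => a ≤ b)) :
    hasRunN cs n = true ↔ ∃ x ∈ cs, (cs.count x : Int) = n := by
  induction cs using hasRunN.induct (n := n) with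
  | case1 => simp [hasRunN]
  | case2 c rest hif =>
    have hle' : ∀ x ∈ c :: rest, c ≤ x := by
      intro x hx; rcases List.mem_cons.mp hx with h | h
      · exact le_of_eq h.symm
      · exact (List.pairwise_cons.mp hp).1 x h
    have hcount : (c :: rest).count c = ((c :: rest).takeWhile (· == c)).length :=
      count_head_sorted c (c :: rest) hle' hp
    rw [hasRunN, if_pos hif]
    simp only [true_iff]
    exact ⟨c, List.mem_cons_self, by rw [hcount]; exact_mod_cast of_decide_eq_true hif⟩
  | case3 c rest hif ih =>
    have hle : ∀ x ∈ rest, c ≤ x := (List.pairwise_cons.mp hp).1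
    have hle' : ∀ x ∈ c :: rest, c ≤ x := by
      intro x hx; rcases List.mem_cons.mp hx with h | h
      · exact le_of_eq h.symm
      · exact hle x h
    have hpd : ((c :: rest).dropWhile (· == c)).Pairwise (fun a b => a ≤ b) :=
      List.Pairwise.sublist (List.dropWhile_sublist _) hp
    have hnot : c ∉ (c :: rest).dropWhile (· == c) := by
      have hd : (c :: rest).dropWhile (· == c) = rest.dropWhile (· == c) := by
        simp
      rw [hd]
      exact head_not_mem_dropWhile c rest hle (List.Pairwise.of_cons hp)
    have hcount : (c :: rest).count c = ((c :: rest).takeWhile (· == c)).length :=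
      count_head_sorted c (c :: rest) hle' hp
    rw [hasRunN, if_neg hif, ih hpd]
    constructor
    · rintro ⟨x, hxmem, hxcnt⟩
      have hxne : x ≠ c := fun h => hnot (h ▸ hxmem)
      have hxl : x ∈ c :: rest := (List.dropWhile_sublist _).subset hxmem
      refine ⟨x, hxl, ?_⟩
      rw [count_other_dropWhile c x (c :: rest) hxne]
      exact hxcnt
    · rintro ⟨x, hxmem, hxcnt⟩
      by_cases hxc : x = c
      · exfalso
        apply hif
        subst hxc
        rw [hcount] at hxcnt
        exact decide_eq_true (by exact_mod_cast hxcnt)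
      · have hxd : x ∈ (c :: rest).dropWhile (· == c) := by
          have hmem2 : x ∈ (c :: rest).takeWhile (· == c) ++ (c :: rest).dropWhile (· == c) := by
            rw [List.takeWhile_append_dropWhile]; exact hxmem
          rcases List.mem_append.mp hmem2 with h | h
          · exact absurd (eq_of_beq (List.mem_takeWhile_imp (p := fun x => x == c) h)) hxc
          · exact h
        refine ⟨x, hxd, ?_⟩
        rw [← count_other_dropWhile c x (c :: rest) hxc]
        exact hxcnt

-- A's per-word dict is the filtered counter items verbatim (fresh distinct keys append)
lemma aDict_items (cs : List Char) (n : Int) :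
    ((((PySem.Dict.counter cs).items).filter (fun kv => kv.2 == n)).foldl
        (fun d kv => d.insert kv.1 kv.2) (PySem.Dict.empty : PySem.Dict Char Int)).items
      = ((PySem.Dict.counter cs).items).filter (fun kv => kv.2 == n) := by
  have h := PySem.Dict.items_foldl_insert_fresh
    (l := ((PySem.Dict.counter cs).items).filter (fun kv => kv.2 == n))
    (k := fun kv => kv.1) (v := fun kv => kv.2) (d := (PySem.Dict.empty : PySem.Dict Char Int))
    (by intro a _; exact PySem.Dict.contains_empty _)
    (by
      have : (((PySem.Dict.counter cs).items).map (fun kv => kv.1)).Nodup := by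
        have := PySem.Dict.nodup_keys_counter (xs := cs)
        simpa [PySem.Dict.keys] using this
      exact this.sublist (List.Sublist.map _ List.filter_sublist))
  simpa [PySem.Dict.empty] using h

-- A's per-word test "len(dict_with_n) > 0" ⟺ some character's frequency equals n
lemma aBit_iff (cs : List Char) (n : Int) :
    ((((PySem.Dict.counter cs).items).filter (fun kv => kv.2 == n)).foldl
        (fun d kv => d.insert kv.1 kv.2) (PySem.Dict.empty : PySem.Dict Char Int)).size > 0
      ↔ ∃ x ∈ cs, (cs.count x : Int) = n := by
  rw [PySem.Dict.size, aDict_items, PySem.Dict.items_counter, gt_iff_lt,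
    List.length_pos_iff, ne_eq, List.filter_eq_nil_iff]
  push Not
  constructor
  · rintro ⟨kv, hmem, hkv⟩
    rcases List.mem_map.mp hmem with ⟨k, hk, rfl⟩
    exact ⟨k, PySem.Set.mem_ofList cs k |>.mp hk, by simpa using hkv⟩
  · rintro ⟨x, hx, hcnt⟩
    exact ⟨(x, (cs.count x : Int)), List.mem_map.mpr ⟨x, (PySem.Set.mem_ofList cs x).mpr hx, rfl⟩,
      by simpa using hcnt⟩

-- the two per-word tests agree: A's dict is nonempty iff the run scan fires
lemma cond_iff (w : String) (n : Int) :
    ((((PySem.Dict.counter w.toList).items).filter (fun kv => kv.2 == n)).foldl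
        (fun d kv => d.insert kv.1 kv.2) (PySem.Dict.empty : PySem.Dict Char Int)).size > 0
      ↔ hasRunN (PySem.List.sorted w.toList (fun x => x) false) n = true := by
  rw [aBit_iff]
  have hs := PySem.List.sorted_pairwise (xs := w.toList) (key := fun x => x)
  have hperm := PySem.List.sorted_perm (xs := w.toList) (key := fun x => x) (rev := false)
  rw [hasRunN_iff n _ hs]
  constructor
  · rintro ⟨x, hx, hc⟩
    exact ⟨x, hperm.mem_iff.mpr hx, by rw [hperm.count_eq]; exact hc⟩
  · rintro ⟨x, hx, hc⟩
    exact ⟨x, hperm.mem_iff.mp hx, by rw [← hperm.count_eq]; exact hc⟩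

-- the outer loops: A's append-then-sum equals B's running total, by one induction
lemma outer_eq (n : Int) (ws : List String) : ∀ (store : List Int) (t : Int), t = store.sum →
    (ws.foldl (fun store word =>
      if ((((PySem.Dict.counter word.toList).items).filter (fun kv => kv.2 == n)).foldl
          (fun d kv => d.insert kv.1 kv.2) (PySem.Dict.empty : PySem.Dict Char Int)).size > 0
        then store ++ [(1 : Int)] else store ++ [(0 : Int)]) store).sum
    = ws.foldl (fun total word =>
        if hasRunN (PySem.List.sorted word.toList (fun x => x) false) n then total + 1 else total) t := by
  induction ws with
  | nil => intro s t h; simpa using h.symm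
  | cons w ws ih =>
    intro s t h
    simp only [List.foldl_cons]
    by_cases hb : hasRunN (PySem.List.sorted w.toList (fun x => x) false) n = true
    · rw [if_pos ((cond_iff w n).mpr hb), if_pos hb]
      exact ih (s ++ [1]) (t + 1) (by simp [h])
    · rw [if_neg (fun hc => hb ((cond_iff w n).mp hc)), if_neg hb]
      exact ih (s ++ [0]) t (by simp [h])

-- ===== VERDICT (by name: the statement is the Claim_ definition above) =====
theorem get_total_exact_n_spec : Claim_equal_get_total_exact_n := by
  intro ws n _
  show get_total_exact_n ws n = get_total_exact_n_alt ws n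
  unfold get_total_exact_n get_total_exact_n_alt
  exact outer_eq n ws [] 0 rfl
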